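-- pv_equiv track=rewrite | github.com/dan-f/concurrent-wc | scripts/create_benchmark_files.py | file_chunks
-- ===== SOURCE A (Python) =====
-- def file_chunks(num_bytes: int):
--     chunk_size = 4096
--     while num_bytes > 0:
--         if num_bytes >= chunk_size:
--             num_bytes -= chunk_size
--             yield chunk_size
--         else:
--             yield num_bytes
--             num_bytes = 0
-- ===== SOURCE B (Python) =====
-- def file_chunks(num_bytes: int):
--     if num_bytes <= 0:
--         return
--     full, rem = divmod(num_bytes, 4096)
--     for _ in range(full):
--         yield 4096
--     if rem:
--         yield rem
-- ===== Notes on version B (the rewrite author's own statement) =====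
-- stated objective: simpler
-- what changed: Replaced the subtract-and-test while loop by a closed-form divmod: yield the quotient-many full 4096 chunks via a flat range loop, then the nonzero remainder.
import Mathlib
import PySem

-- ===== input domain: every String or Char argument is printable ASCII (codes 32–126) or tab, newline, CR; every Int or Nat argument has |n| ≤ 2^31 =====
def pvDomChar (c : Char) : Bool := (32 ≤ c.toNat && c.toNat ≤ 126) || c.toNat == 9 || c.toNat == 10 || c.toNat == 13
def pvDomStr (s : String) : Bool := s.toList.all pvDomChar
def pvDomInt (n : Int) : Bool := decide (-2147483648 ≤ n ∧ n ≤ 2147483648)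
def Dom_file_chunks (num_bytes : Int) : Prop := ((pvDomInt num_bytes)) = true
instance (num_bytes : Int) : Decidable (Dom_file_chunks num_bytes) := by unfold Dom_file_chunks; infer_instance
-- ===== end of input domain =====

-- B: closed-form divmod (quotient of full chunks + remainder) instead of A's subtract-and-test loop; same values.
-- ===== PORT A =====
-- while num_bytes > 0: subtract a full chunk or emit the final partial chunk
def file_chunks (num_bytes : Int) : List Int :=
  if _h : num_bytes > 0 then
    if num_bytes ≥ 4096 then 4096 :: file_chunks (num_bytes - 4096)
    else [num_bytes]
  else []
termination_by num_bytes.toNat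
decreasing_by omega

-- ===== PORT B =====
def file_chunks_alt (num_bytes : Int) : List Int :=
  if num_bytes ≤ 0 then []
  else
    let full := PySem.Int.floordiv num_bytes 4096
    let rem := PySem.Int.mod num_bytes 4096
    ((PySem.List.pyRange 0 full 1).map (fun _ => (4096 : Int)))
      ++ (if rem ≠ 0 then [rem] else [])

-- ===== PRECONDITION & SPEC =====
def Spec_file_chunks (num_bytes : Int) (out : List Int) : Prop := out = file_chunks_alt num_bytes
instance (num_bytes : Int) (out : List Int) : Decidable (Spec_file_chunks num_bytes out) := by unfold Spec_file_chunks; infer_instance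

-- ===== CLAIM (what is proved, stated in full; the proofs are below) =====
def Claim_equal_file_chunks : Prop := ∀ (num_bytes : Int), Dom_file_chunks num_bytes → Spec_file_chunks num_bytes (file_chunks num_bytes)

-- ===== LEMMAS AND PROOFS =====

theorem map_const_pyRange (a b c : Int) :
    (PySem.List.pyRange a b 1).map (fun _ => c) = List.replicate (b - a).toNat c := by
  rw [PySem.List.pyRange_one, List.map_map,
      show ((fun _ => c) ∘ fun k : Nat => a + (k : Int)) = fun _ : Nat => c from rfl,
      List.map_const', List.length_range]

theorem alt_replicate (n : Int) (hn : 0 ≤ n) :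
    file_chunks_alt n =
      List.replicate (Int.toNat (n / 4096)) 4096 ++ (if n % 4096 ≠ 0 then [n % 4096] else []) := by
  rcases lt_or_eq_of_le hn with hpos | hz
  case inr => rw [← hz]; decide
  unfold file_chunks_alt
  rw [if_neg (by omega), PySem.Int.floordiv_eq_ediv_of_pos (by omega),
      PySem.Int.mod_eq_emod_of_pos (by omega)]
  show List.map _ (PySem.List.pyRange 0 (n / 4096) 1) ++ _ = _
  rw [map_const_pyRange]
  norm_num

theorem ab_eq (n : Int) : file_chunks n = file_chunks_alt n := by
  by_cases h : 0 < n
  · by_cases h2 : n ≥ 4096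
    · rw [alt_replicate n (le_of_lt h)]
      unfold file_chunks
      rw [dif_pos h, if_pos h2, ab_eq (n - 4096), alt_replicate (n - 4096) (by omega)]
      have hq : n / 4096 = (n - 4096) / 4096 + 1 := by
        have := Int.add_mul_ediv_right (n - 4096) 1 (show (4096:Int) ≠ 0 by norm_num)
        rw [show n - 4096 + 1 * 4096 = n by ring] at this
        simpa using this
      have hm : n % 4096 = (n - 4096) % 4096 := by
        have := Int.add_mul_emod_self_right (a := n - 4096) (b := 1) (c := 4096)
        rw [show n - 4096 + 1 * 4096 = n by ring] at this
        exact this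
      have hq0 : 0 ≤ (n - 4096) / 4096 := Int.ediv_nonneg (by omega) (by norm_num)
      rw [hq, hm, Int.toNat_add hq0 (by norm_num)]
      norm_num [List.replicate_succ]
    · rw [alt_replicate n (le_of_lt h)]
      unfold file_chunks
      rw [dif_pos h, if_neg h2]
      have hq : n / 4096 = 0 := Int.ediv_eq_zero_of_lt (by omega) (by omega)
      have hm : n % 4096 = n := Int.emod_eq_of_lt (by omega) (by omega)
      rw [hq, hm, if_pos (by omega)]
      simp
  · unfold file_chunks file_chunks_alt
    rw [dif_neg h, if_pos (by omega)]
termination_by n.toNat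
decreasing_by omega

-- ===== VERDICT (by name: the statement is the Claim_ definition above) =====
theorem file_chunks_spec : Claim_equal_file_chunks := by
  intro n _
  exact ab_eq n
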